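-- pv_equiv track=rewrite | github.com/sammarth-k/Chandra-Lightcurve-Download | chandralc/analysis.py | bin_lc
-- ===== SOURCE A (Python) =====
-- def bin_lc(lightcurve, binsize):
--     """Bins photon counts.
--
--     Parameters
--     ----------
--     lc: ChandraLightcurve
--         ChandraLightcurve object
--     binsize : int
--         Size of bin
--
--     Returns
--     -------
--     list
--         Array of bins
--     """
--     binned_photons = []
--
--     # range: total number of df points over included bins --> temp3 of intervals
--     for j in range(0, len(lightcurve)//binsize):
--         temp2 = 0
--         j *= binsize
--         for k in range(binsize):
--             # sum of all photons within one interval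
--             temp2 = temp2 + lightcurve[j+k]
--
--         # appends that sum to a list
--         binned_photons.append(temp2)
--
--     return binned_photons
-- ===== SOURCE B (Python) =====
-- def bin_lc(lightcurve, binsize):
--     nbins = len(lightcurve) // binsize
--     prefix = [0]
--     for count in lightcurve:
--         prefix.append(prefix[-1] + count)
--     return [prefix[(j + 1) * binsize] - prefix[j * binsize] for j in range(nbins)]
-- ===== Notes on version B (the rewrite author's own statement) =====
-- stated objective: alternative
-- what changed: B builds a running prefix-sum table in one pass over the data and obtains each bin as a difference of two prefix sums, instead of A's nested loop that re-sums every chunk element by element with index arithmetic.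
import Mathlib
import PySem

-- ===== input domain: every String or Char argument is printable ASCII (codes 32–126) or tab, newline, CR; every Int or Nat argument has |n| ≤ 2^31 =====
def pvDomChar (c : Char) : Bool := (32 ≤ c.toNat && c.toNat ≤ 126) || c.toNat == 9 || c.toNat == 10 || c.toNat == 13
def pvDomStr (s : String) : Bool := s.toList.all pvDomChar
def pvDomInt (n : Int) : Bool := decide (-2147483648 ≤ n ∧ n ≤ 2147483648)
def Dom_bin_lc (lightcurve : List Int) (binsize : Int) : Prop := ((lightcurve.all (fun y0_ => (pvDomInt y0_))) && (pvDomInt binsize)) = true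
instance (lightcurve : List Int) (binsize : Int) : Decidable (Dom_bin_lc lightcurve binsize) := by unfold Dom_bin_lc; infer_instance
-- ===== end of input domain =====

-- B replaces A's nested re-summing loop by a one-pass prefix-sum table with each bin obtained
-- as a difference of two prefix sums (alternative decomposition, same O(n) cost).


-- ===== PORT A =====
def bin_lc (lightcurve : List Int) (binsize : Int) : List Int :=
  (PySem.List.pyRange 0 (PySem.Int.floordiv (lightcurve.length : Int) binsize) 1).foldl
    (fun binned_photons j =>
      let j2 := j * binsize
      binned_photons ++
        [(PySem.List.pyRange 0 binsize 1).foldl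
          (fun temp2 k => temp2 + PySem.List.pyGetD lightcurve (j2 + k) 0) 0]) []

-- ===== PORT B =====
def bin_lc_alt (lightcurve : List Int) (binsize : Int) : List Int :=
  let nbins := PySem.Int.floordiv (lightcurve.length : Int) binsize
  let pre := lightcurve.foldl (fun p c => p ++ [PySem.List.pyGetD p (-1) 0 + c]) [0]
  (PySem.List.pyRange 0 nbins 1).map
    (fun j => PySem.List.pyGetD pre ((j + 1) * binsize) 0 - PySem.List.pyGetD pre (j * binsize) 0)

-- ===== PRECONDITION & SPEC =====
-- Pre_ excludes only binsize = 0, where Python A raises ZeroDivisionError.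
def Pre_bin_lc (lightcurve : List Int) (binsize : Int) : Prop := binsize ≠ 0
instance (lightcurve : List Int) (binsize : Int) : Decidable (Pre_bin_lc lightcurve binsize) := by unfold Pre_bin_lc; infer_instance
def pvWitness_bin_lc : List Int × Int := ([1, 2, 3, 4, 5], 2)

def Spec_bin_lc (lightcurve : List Int) (binsize : Int) (out : List Int) : Prop := out = bin_lc_alt lightcurve binsize
instance (lightcurve : List Int) (binsize : Int) (out : List Int) : Decidable (Spec_bin_lc lightcurve binsize out) := by unfold Spec_bin_lc; infer_instance

-- ===== CLAIM (what is proved, stated in full; the proofs are below) =====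
def Claim_equal_bin_lc : Prop := ∀ (lightcurve : List Int) (binsize : Int), Dom_bin_lc lightcurve binsize → Pre_bin_lc lightcurve binsize → Spec_bin_lc lightcurve binsize (bin_lc lightcurve binsize)

-- ===== LEMMAS AND PROOFS =====

theorem floordiv_nat_nonpos (n : Nat) (b : Int) (hb : b < 0) :
    PySem.Int.floordiv (n : Int) b ≤ 0 := by
  by_contra h
  push_neg at h
  have h1 := PySem.Int.floordiv_mul_add_mod (n : Int) b
  have h2 := PySem.Int.mod_neg_bounds (a := (n : Int)) hb
  have h3 : (0 : Int) ≤ n := Int.natCast_nonneg n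
  nlinarith

-- running partial sums, starting from accumulator a
def psums (a : Int) : List Int → List Int
  | [] => []
  | c :: cs => (a + c) :: psums (a + c) cs

theorem pyGetD_last (p : List Int) (x : Int) :
    PySem.List.pyGetD (p ++ [x]) (-1) 0 = x := by
  simp [PySem.List.pyGetD, PySem.List.pyGet?, PySem.List.pyIdx?]

theorem foldl_pre (xs : List Int) (p : List Int) (a : Int)
    (h : PySem.List.pyGetD p (-1) 0 = a) :
    xs.foldl (fun q c => q ++ [PySem.List.pyGetD q (-1) 0 + c]) p = p ++ psums a xs := by
  induction xs generalizing p a with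
  | nil => simp [psums]
  | cons c cs ih =>
      simp only [List.foldl_cons, h, psums]
      rw [ih (p ++ [a + c]) (a + c) (pyGetD_last p (a + c))]
      simp

theorem psums_getElem (xs : List Int) (a : Int) (i : Nat) (h : i < xs.length) :
    (psums a xs).getD i 0 = a + (xs.take (i + 1)).sum := by
  induction xs generalizing a i with
  | nil => simp at h
  | cons c cs ih =>
      cases i with
      | zero => simp [psums]
      | succ m =>
          simp only [psums, List.getD_cons_succ]
          rw [ih (a + c) m (by simpa using h)]
          simp [List.take_succ_cons]
          ring

theorem pre_get (xs : List Int) (i : Nat) (h : i ≤ xs.length) :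
    PySem.List.pyGetD (0 :: psums 0 xs) (i : Int) 0 = (xs.take i).sum := by
  rw [PySem.List.pyGetD_natCast]
  cases i with
  | zero => simp
  | succ m =>
      simp only [List.getD_cons_succ]
      rw [psums_getElem xs 0 m (by omega)]
      simp

theorem innerSumA (xs : List Int) (s b : Nat) (h : s + b ≤ xs.length) :
    (PySem.List.pyRange 0 (b : Int) 1).foldl
      (fun t k => t + PySem.List.pyGetD xs ((s : Int) + k) 0) 0
      = ((xs.drop s).take b).sum := by
  induction b with
  | zero => simp [PySem.List.pyRange_one_eq_nil]
  | succ m ih =>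
      have hcast : ((m + 1 : Nat) : Int) = (m : Int) + 1 := by push_cast; ring
      rw [hcast, PySem.List.pyRange_one_succ_right (by positivity), List.foldl_append]
      simp only [List.foldl_cons, List.foldl_nil]
      rw [ih (by omega)]
      have hsm : (s : Int) + (m : Int) = ((s + m : Nat) : Int) := by push_cast; ring
      rw [hsm, PySem.List.pyGetD_natCast]
      have hlt : s + m < xs.length := by omega
      have hd : m < (xs.drop s).length := by simp; omega
      rw [List.take_add_one]
      have : (xs.drop s)[m]? = some xs[s + m] := by
        rw [List.getElem?_drop]
        simp [List.getElem?_eq_getElem (by omega : s + m < xs.length)]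
      rw [this]
      simp [List.getD_eq_getElem?_getD, List.getElem?_eq_getElem hlt]

theorem bin_lc_spec : Claim_equal_bin_lc := by
  intro xs binsize _ hpre
  unfold Spec_bin_lc bin_lc bin_lc_alt Pre_bin_lc at *
  rcases lt_or_gt_of_ne hpre with hneg | hpos
  · -- binsize < 0 : zero or negative bin count, both return []
    have h0 := floordiv_nat_nonpos xs.length binsize hneg
    simp [PySem.List.pyRange_one_eq_nil h0]
  · -- binsize > 0
    obtain ⟨b, rfl⟩ : ∃ b : Nat, binsize = (b : Int) :=
      ⟨binsize.toNat, (Int.toNat_of_nonneg hpos.le).symm⟩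
    have hb : 0 < b := by exact_mod_cast hpos
    rw [PySem.Int.floordiv_natCast]
    rw [foldl_pre xs [0] 0 (by simp [PySem.List.pyGetD, PySem.List.pyGet?, PySem.List.pyIdx?])]
    simp only [List.singleton_append]
    rw [PySem.List.foldl_append_singleton_eq_map]
    apply List.map_congr_left
    intro j hj
    rw [PySem.List.mem_pyRange_one] at hj
    obtain ⟨hj0, hjlt⟩ := hj
    obtain ⟨jn, rfl⟩ : ∃ k : Nat, j = (k : Int) := ⟨j.toNat, (Int.toNat_of_nonneg hj0).symm⟩
    have hjn : jn < xs.length / b := by exact_mod_cast hjlt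
    have hjb : (jn + 1) * b ≤ xs.length := by
      have := (Nat.le_div_iff_mul_le hb).mp (Nat.succ_le_of_lt hjn)
      omega
    have hj0b : jn * b + b ≤ xs.length := by
      have : jn * b + b = (jn + 1) * b := by ring
      omega
    have e1 : ((jn : Int)) * (b : Int) = ((jn * b : Nat) : Int) := by push_cast; ring
    have e2 : ((jn : Int) + 1) * (b : Int) = (((jn + 1) * b : Nat) : Int) := by push_cast; ring
    simp only [e1, e2]
    rw [pre_get xs _ hjb, pre_get xs _ (by omega)]
    rw [innerSumA xs (jn * b) b (by omega)]
    rw [show ((jn + 1) * b) = jn * b + b by ring, List.take_add, List.sum_append]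
    ring
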